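-- pv_equiv track=rewrite | github.com/bioinfo-tsukuba/GEMS-python-article-data | gems_ot2_colour-water-optimisation/RGB_converter/main.py | create_box
-- ===== SOURCE A (Python) =====
-- def create_box(img_array, centre: list = (10, 10), xy_len:int = 40):
--     # xy_len = min(len(img_array), len(img_array[0])) // 10
--     for x_ in range(-xy_len, xy_len):
--         for y_ in range(-xy_len, xy_len):
--             x = x_ + centre[0]
--             y = y_ + centre[1]
--             if 0 <= x < len(img_array) and 0 <= y < len(img_array[0]):
--                 img_array[x][y] = [255, 255, 0]
--     return img_array
-- ===== SOURCE B (Python) =====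
-- def create_box(img_array, centre: list = (10, 10), xy_len: int = 40):
--     # Bounds-first rewrite: clamp the box to the image once, then overwrite each
--     # affected row with a single slice assignment (same in-place mutation as A).
--     if xy_len <= 0:
--         return img_array
--     x0 = max(0, centre[0] - xy_len)
--     x1 = min(len(img_array), centre[0] + xy_len)
--     if x0 < x1:
--         y0 = max(0, centre[1] - xy_len)
--         y1 = min(len(img_array[0]), centre[1] + xy_len)
--         if y0 < y1:
--             for x in range(x0, x1):
--                 img_array[x][y0:y1] = [[255, 255, 0] for _ in range(y1 - y0)]
--     return img_array
-- ===== Notes on version B (the rewrite author's own statement) =====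
-- stated objective: simpler
-- what changed: A scans the full (2*xy_len)^2 offset grid and guards every pixel; B clamps the box to the image bounds once, returns early when the clamped window is empty, and overwrites each affected row with one slice assignment of fresh [255,255,0] pixels.
import Mathlib
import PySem

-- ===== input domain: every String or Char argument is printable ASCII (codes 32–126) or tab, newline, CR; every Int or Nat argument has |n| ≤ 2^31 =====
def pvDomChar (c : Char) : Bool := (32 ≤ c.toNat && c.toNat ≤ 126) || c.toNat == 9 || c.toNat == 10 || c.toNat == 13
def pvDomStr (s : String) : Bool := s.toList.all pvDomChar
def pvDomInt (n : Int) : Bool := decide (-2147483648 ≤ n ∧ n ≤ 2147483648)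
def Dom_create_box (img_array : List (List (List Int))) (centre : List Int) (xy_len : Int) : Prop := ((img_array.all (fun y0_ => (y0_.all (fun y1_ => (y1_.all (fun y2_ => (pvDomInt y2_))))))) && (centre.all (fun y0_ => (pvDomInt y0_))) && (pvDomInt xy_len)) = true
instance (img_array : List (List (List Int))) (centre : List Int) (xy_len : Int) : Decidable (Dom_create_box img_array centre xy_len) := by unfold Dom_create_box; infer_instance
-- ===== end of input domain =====

-- B changes the decomposition (bounds-first + per-row slice write instead of A's guarded
-- per-pixel double loop); the equivalence proved is about the returned value (both Pythons
-- also mutate img_array in place, to the same final state).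

-- ===== PORT A =====
-- A-side helper: one loop-body step 'if guard: img_array[x][y] = [255, 255, 0]'
def stepA (img : List (List (List Int))) (x y : Int) : List (List (List Int)) :=
  if 0 ≤ x ∧ x < (img.length : Int) ∧ 0 ≤ y ∧ y < ((img.headD []).length : Int) then
    PySem.List.pySetD img x (PySem.List.pySetD (PySem.List.pyGetD img x []) y [255, 255, 0])
  else img

def create_box (img_array : List (List (List Int))) (centre : List Int) (xy_len : Int) : List (List (List Int)) :=
  (PySem.List.pyRange (-xy_len) xy_len 1).foldl
    (fun img x_ =>
      (PySem.List.pyRange (-xy_len) xy_len 1).foldl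
        (fun img y_ => stepA img (x_ + PySem.List.pyGetD centre 0 0) (y_ + PySem.List.pyGetD centre 1 0))
        img)
    img_array

-- ===== PORT B =====
-- B-side helper: the slice assignment row[a:b] = [[255,255,0] for _ in range(b-a)]  (0 ≤ a ≤ b)
def spliceRow (row : List (List Int)) (a b : Nat) : List (List Int) :=
  row.take a ++ ((List.range (b - a)).map (fun _ => ([255, 255, 0] : List Int)) ++ row.drop b)

def create_box_alt (img_array : List (List (List Int))) (centre : List Int) (xy_len : Int) : List (List (List Int)) :=
  if xy_len ≤ 0 then img_array
  else
    let c0 := PySem.List.pyGetD centre 0 0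
    let x0 := max 0 (c0 - xy_len)
    let x1 := min (img_array.length : Int) (c0 + xy_len)
    if x0 < x1 then
      let c1 := PySem.List.pyGetD centre 1 0
      let y0 := max 0 (c1 - xy_len)
      let y1 := min ((img_array.headD []).length : Int) (c1 + xy_len)
      if y0 < y1 then
        (PySem.List.pyRange x0 x1 1).foldl
          (fun img x => PySem.List.pySetD img x (spliceRow (PySem.List.pyGetD img x []) y0.toNat y1.toNat))
          img_array
      else img_array
    else img_array

-- ===== PRECONDITION & SPEC =====
-- Pre_ excludes exactly the inputs where Python A raises IndexError: centre shorter than 2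
-- while the loops run (xy_len > 0), or a ragged row inside the clamped box shorter than the
-- y-window (A's guard tests len(img_array[0]) but writes into row x).
def Pre_create_box (img_array : List (List (List Int))) (centre : List Int) (xy_len : Int) : Prop :=
  xy_len ≤ 0 ∨
  (2 ≤ centre.length ∧
    ∀ i ∈ List.range img_array.length,
      (centre.getD 0 0 - xy_len ≤ (i : Int) ∧ (i : Int) < centre.getD 0 0 + xy_len ∧
        max 0 (centre.getD 1 0 - xy_len) < min (((img_array.headD []).length : Int)) (centre.getD 1 0 + xy_len)) →
      min (((img_array.headD []).length : Int)) (centre.getD 1 0 + xy_len) ≤ ((img_array.getD i []).length : Int))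
instance (img_array : List (List (List Int))) (centre : List Int) (xy_len : Int) : Decidable (Pre_create_box img_array centre xy_len) := by unfold Pre_create_box; infer_instance

def pvWitness_create_box : List (List (List Int)) × List Int × Int := ([[[0, 0, 0]]], [0, 0], 1)

def Spec_create_box (img_array : List (List (List Int))) (centre : List Int) (xy_len : Int) (out : List (List (List Int))) : Prop := out = create_box_alt img_array centre xy_len
instance (img_array : List (List (List Int))) (centre : List Int) (xy_len : Int) (out : List (List (List Int))) : Decidable (Spec_create_box img_array centre xy_len out) := by unfold Spec_create_box; infer_instance

-- ===== CLAIM (what is proved, stated in full; the proofs are below) =====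
def Claim_equal_create_box : Prop := ∀ (img_array : List (List (List Int))) (centre : List Int) (xy_len : Int), Dom_create_box img_array centre xy_len → Pre_create_box img_array centre xy_len → Spec_create_box img_array centre xy_len (create_box img_array centre xy_len)

-- ===== LEMMAS AND PROOFS =====

theorem getD_eq_get {A : Type} (l : List A) (d : A) (n : Nat) (h : n < l.length) : l.getD n d = l[n] := by
  rw [List.getD_eq_getElem?_getD, List.getElem?_eq_getElem h, Option.getD_some]

theorem headD_len_set (im : List (List (List Int))) (n : Nat) (r : List (List Int))
    (hr : r.length = (im.getD n []).length) :
    ((im.set n r).headD []).length = (im.headD []).length := by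
  cases im with
  | nil => simp
  | cons h t =>
    cases n with
    | zero => simpa using hr
    | succ m => simp

-- the inner y-loop at row level, with the image's row-0 length M frozen
def paint (M : Nat) (ys : List Int) (row : List (List Int)) : List (List Int) :=
  ys.foldl (fun r y => if 0 ≤ y ∧ y < (M : Int) then PySem.List.pySetD r y [255, 255, 0] else r) row

theorem paint_cons (M : Nat) (y : Int) (ys : List Int) (row : List (List Int)) :
    paint M (y :: ys) row =
      paint M ys (if 0 ≤ y ∧ y < (M : Int) then PySem.List.pySetD row y [255, 255, 0] else row) := rfl

theorem length_paint (M : Nat) (ys : List Int) : ∀ (row : List (List Int)),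
    (paint M ys row).length = row.length := by
  induction ys with
  | nil => intro row; rfl
  | cons y ys ih =>
    intro row
    rw [paint_cons, ih]
    split
    · next h => rw [PySem.List.pySetD_of_nonneg _ _ h.1, List.length_set]
    · rfl

theorem paint_getElem? (M : Nat) (ys : List Int) : ∀ (row : List (List Int)) (j : Nat),
    (paint M ys row)[j]? =
      if (∃ y ∈ ys, y = (j : Int)) ∧ (j : Int) < (M : Int) ∧ j < row.length
      then some [255, 255, 0] else row[j]? := by
  induction ys with
  | nil => intro row j; simp [paint]
  | cons y ys ih =>
    intro row j
    rw [paint_cons, ih]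
    by_cases hg : 0 ≤ y ∧ y < (M : Int)
    · rw [if_pos hg, PySem.List.pySetD_of_nonneg _ _ hg.1, List.length_set]
      by_cases hy : y = (j : Int)
      · have hjM : (j : Int) < (M : Int) := hy ▸ hg.2
        by_cases hjr : j < row.length
        · rw [if_pos (show (∃ y' ∈ y :: ys, y' = (j : Int)) ∧ (j : Int) < (M : Int) ∧ j < row.length
              from ⟨⟨y, List.mem_cons_self, hy⟩, hjM, hjr⟩)]
          by_cases hys : (∃ y' ∈ ys, y' = (j : Int)) ∧ (j : Int) < (M : Int) ∧ j < row.length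
          · rw [if_pos hys]
          · rw [if_neg hys, show y.toNat = j from by omega, List.getElem?_set_self hjr]
        · rw [if_neg (show ¬((∃ y' ∈ ys, y' = (j : Int)) ∧ (j : Int) < (M : Int) ∧ j < row.length)
              from fun h => hjr h.2.2),
              if_neg (show ¬((∃ y' ∈ y :: ys, y' = (j : Int)) ∧ (j : Int) < (M : Int) ∧ j < row.length)
              from fun h => hjr h.2.2),
              List.getElem?_set, if_pos (show y.toNat = j from by omega),
              if_neg (show ¬ y.toNat < row.length from by omega),
              List.getElem?_eq_none (by omega : row.length ≤ j)]
      · rw [List.getElem?_set_ne (show y.toNat ≠ j from by omega)]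
        by_cases hys : (∃ y' ∈ ys, y' = (j : Int)) ∧ (j : Int) < (M : Int) ∧ j < row.length
        · rw [if_pos hys, if_pos (show (∃ y' ∈ y :: ys, y' = (j : Int)) ∧ (j : Int) < (M : Int) ∧ j < row.length
            from ⟨⟨hys.1.choose, List.mem_cons_of_mem _ hys.1.choose_spec.1, hys.1.choose_spec.2⟩, hys.2⟩)]
        · rw [if_neg hys, if_neg (show ¬((∃ y' ∈ y :: ys, y' = (j : Int)) ∧ (j : Int) < (M : Int) ∧ j < row.length)
            from by
              rintro ⟨⟨y', hy', he⟩, h2, h3⟩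
              rcases List.mem_cons.mp hy' with rfl | hm
              · exact hy he
              · exact hys ⟨⟨y', hm, he⟩, h2, h3⟩)]
    · rw [if_neg hg]
      by_cases hys : (∃ y' ∈ ys, y' = (j : Int)) ∧ (j : Int) < (M : Int) ∧ j < row.length
      · rw [if_pos hys, if_pos (show (∃ y' ∈ y :: ys, y' = (j : Int)) ∧ (j : Int) < (M : Int) ∧ j < row.length
          from ⟨⟨hys.1.choose, List.mem_cons_of_mem _ hys.1.choose_spec.1, hys.1.choose_spec.2⟩, hys.2⟩)]
      · rw [if_neg hys, if_neg (show ¬((∃ y' ∈ y :: ys, y' = (j : Int)) ∧ (j : Int) < (M : Int) ∧ j < row.length)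
          from by
            rintro ⟨⟨y', hy', he⟩, h2, h3⟩
            rcases List.mem_cons.mp hy' with rfl | hm
            · exact hg ⟨by omega, by omega⟩
            · exact hys ⟨⟨y', hm, he⟩, h2, h3⟩)]

-- what A's inner loop does to the image, for one x
def Abody (ys : List Int) (im : List (List (List Int))) (x : Int) : List (List (List Int)) :=
  if 0 ≤ x ∧ x < (im.length : Int) then
    PySem.List.pySetD im x (paint ((im.headD []).length) ys (PySem.List.pyGetD im x []))
  else im

theorem inner_fold (x : Int) (ys : List Int) : ∀ (im : List (List (List Int))),
    ys.foldl (fun im' y => stepA im' x y) im = Abody ys im x := by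
  induction ys with
  | nil =>
    intro im
    rw [List.foldl_nil]
    unfold Abody
    split
    · next h =>
      rw [PySem.List.pySetD_of_nonneg _ _ h.1, PySem.List.pyGetD_eq_getElem _ _ h.1 h.2]
      exact (List.set_getElem_self (by omega)).symm
    · rfl
  | cons y ys ih =>
    intro im
    simp only [List.foldl_cons]
    by_cases hx : 0 ≤ x ∧ x < (im.length : Int)
    · by_cases hy : 0 ≤ y ∧ y < ((im.headD []).length : Int)
      · have hstep : stepA im x y =
            im.set x.toNat (PySem.List.pySetD (PySem.List.pyGetD im x []) y [255, 255, 0]) := by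
          unfold stepA
          rw [if_pos (show 0 ≤ x ∧ x < (im.length : Int) ∧ 0 ≤ y ∧ y < ((im.headD []).length : Int)
              from ⟨hx.1, hx.2, hy⟩),
            PySem.List.pySetD_of_nonneg _ _ hx.1]
        have hr'len : (PySem.List.pySetD (PySem.List.pyGetD im x []) y [255, 255, 0]).length
            = (im.getD x.toNat []).length := by
          rw [PySem.List.pySetD_of_nonneg _ _ hy.1, List.length_set,
              PySem.List.pyGetD_eq_getElem _ _ hx.1 hx.2, getD_eq_get im [] x.toNat (by omega)]
        rw [hstep, ih]
        unfold Abody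
        rw [List.length_set, headD_len_set _ _ _ hr'len, if_pos hx,
            PySem.List.pySetD_of_nonneg _ _ hx.1, PySem.List.pySetD_of_nonneg _ _ hx.1,
            List.set_set]
        have hget : PySem.List.pyGetD
            (im.set x.toNat (PySem.List.pySetD (PySem.List.pyGetD im x []) y [255, 255, 0])) x
            ([] : List (List Int))
            = PySem.List.pySetD (PySem.List.pyGetD im x []) y [255, 255, 0] := by
          rw [PySem.List.pyGetD_eq_getElem _ _ hx.1 (by rw [List.length_set]; exact hx.2)]
          exact List.getElem_set_self _
        rw [hget, paint_cons, if_pos hy, if_pos hx]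
      · have hstep : stepA im x y = im := by
          unfold stepA
          rw [if_neg (show ¬(0 ≤ x ∧ x < (im.length : Int) ∧ 0 ≤ y ∧ y < ((im.headD []).length : Int))
            from by rintro ⟨h1, h2, h3⟩; exact hy h3)]
        rw [hstep, ih]
        unfold Abody
        rw [if_pos hx, paint_cons, if_neg hy, if_pos hx]
    · have hstep : stepA im x y = im := by
        unfold stepA
        rw [if_neg (show ¬(0 ≤ x ∧ x < (im.length : Int) ∧ 0 ≤ y ∧ y < ((im.headD []).length : Int))
          from by rintro ⟨h1, h2, h3⟩; exact hx ⟨h1, h2⟩)]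
      rw [hstep, ih]
      unfold Abody
      rw [if_neg hx, if_neg hx]

-- A's outer x-loop, row-indexed characterisation
theorem outerA_getElem? (ys : List Int) : ∀ (xs : List Int), xs.Nodup →
    ∀ (im : List (List (List Int))) (i : Nat),
    (xs.foldl (Abody ys) im)[i]? =
      if ∃ x ∈ xs, x = (i : Int) ∧ x < (im.length : Int)
      then (im[i]?).map (paint ((im.headD []).length) ys) else im[i]? := by
  intro xs
  induction xs with
  | nil => intro _ im i; simp
  | cons x xs ih =>
    intro hnd im i
    simp only [List.foldl_cons]
    by_cases hx : 0 ≤ x ∧ x < (im.length : Int)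
    · have hrlen : (paint ((im.headD []).length) ys (PySem.List.pyGetD im x [])).length
          = (im.getD x.toNat []).length := by
        rw [length_paint, PySem.List.pyGetD_eq_getElem _ _ hx.1 hx.2, getD_eq_get im [] x.toNat (by omega)]
      have hstep : Abody ys im x =
          im.set x.toNat (paint ((im.headD []).length) ys (PySem.List.pyGetD im x [])) := by
        unfold Abody
        rw [if_pos hx, PySem.List.pySetD_of_nonneg _ _ hx.1]
      rw [hstep, ih hnd.of_cons, List.length_set, headD_len_set _ _ _ hrlen]
      by_cases hxs : ∃ x' ∈ xs, x' = (i : Int) ∧ x' < (im.length : Int)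
      · rw [if_pos hxs, if_pos (show ∃ x' ∈ x :: xs, x' = (i : Int) ∧ x' < (im.length : Int)
          from ⟨hxs.choose, List.mem_cons_of_mem _ hxs.choose_spec.1, hxs.choose_spec.2⟩)]
        have hxne : x ≠ (i : Int) := by
          rintro rfl
          obtain ⟨x', h1, h2, -⟩ := hxs
          exact (List.nodup_cons.mp hnd).1 (h2 ▸ h1)
        rw [List.getElem?_set_ne (show x.toNat ≠ i from by omega)]
      · rw [if_neg hxs]
        by_cases hhit : x = (i : Int)
        · rw [if_pos (show ∃ x' ∈ x :: xs, x' = (i : Int) ∧ x' < (im.length : Int)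
            from ⟨x, List.mem_cons_self, hhit, hx.2⟩)]
          have hi : i < im.length := by omega
          have hgeti : PySem.List.pyGetD im x ([] : List (List Int)) = im[i] := by
            rw [PySem.List.pyGetD_eq_getElem _ _ hx.1 hx.2]
            exact Option.some.inj (by
              rw [← List.getElem?_eq_getElem (by omega : x.toNat < im.length),
                  show x.toNat = i from by omega, List.getElem?_eq_getElem hi])
          rw [hgeti, show x.toNat = i from by omega, List.getElem?_set_self hi,
              List.getElem?_eq_getElem hi, Option.map_some]
        · rw [List.getElem?_set_ne (show x.toNat ≠ i from by omega),
              if_neg (show ¬ ∃ x' ∈ x :: xs, x' = (i : Int) ∧ x' < (im.length : Int) from by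
                rintro ⟨x', hx', h2, h3⟩
                rcases List.mem_cons.mp hx' with rfl | hm
                · exact hhit h2
                · exact hxs ⟨x', hm, h2, h3⟩)]
    · have hstep : Abody ys im x = im := by
        unfold Abody
        rw [if_neg hx]
      rw [hstep, ih hnd.of_cons]
      by_cases hxs : ∃ x' ∈ xs, x' = (i : Int) ∧ x' < (im.length : Int)
      · rw [if_pos hxs, if_pos (show ∃ x' ∈ x :: xs, x' = (i : Int) ∧ x' < (im.length : Int)
          from ⟨hxs.choose, List.mem_cons_of_mem _ hxs.choose_spec.1, hxs.choose_spec.2⟩)]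
      · rw [if_neg hxs, if_neg (show ¬ ∃ x' ∈ x :: xs, x' = (i : Int) ∧ x' < (im.length : Int) from by
          rintro ⟨x', hx', h2, h3⟩
          rcases List.mem_cons.mp hx' with rfl | hm
          · exact hx ⟨by omega, h3⟩
          · exact hxs ⟨x', hm, h2, h3⟩)]

-- B's outer loop, same characterisation (no guard; indices in range by hypothesis)
theorem outerB_getElem? (g : List (List Int) → List (List Int)) : ∀ (xs : List Int), xs.Nodup →
    ∀ (im : List (List (List Int))), (∀ x ∈ xs, 0 ≤ x ∧ x < (im.length : Int)) → ∀ (i : Nat),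
    (xs.foldl (fun im' x => PySem.List.pySetD im' x (g (PySem.List.pyGetD im' x []))) im)[i]? =
      if ∃ x ∈ xs, x = (i : Int) then (im[i]?).map g else im[i]? := by
  intro xs
  induction xs with
  | nil => intro _ im _ i; simp
  | cons x xs ih =>
    intro hnd im hmem i
    have hx := hmem x List.mem_cons_self
    simp only [List.foldl_cons]
    rw [PySem.List.pySetD_of_nonneg _ _ hx.1,
        ih hnd.of_cons _ (by
          intro x' h'
          rw [List.length_set]
          exact hmem x' (List.mem_cons_of_mem _ h'))]
    by_cases hxs : ∃ x' ∈ xs, x' = (i : Int)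
    · rw [if_pos hxs, if_pos (show ∃ x' ∈ x :: xs, x' = (i : Int)
        from ⟨hxs.choose, List.mem_cons_of_mem _ hxs.choose_spec.1, hxs.choose_spec.2⟩)]
      have hxne : x ≠ (i : Int) := by
        rintro rfl
        obtain ⟨x', h1, h2⟩ := hxs
        exact (List.nodup_cons.mp hnd).1 (h2 ▸ h1)
      rw [List.getElem?_set_ne (show x.toNat ≠ i from by omega)]
    · rw [if_neg hxs]
      by_cases hhit : x = (i : Int)
      · rw [if_pos (show ∃ x' ∈ x :: xs, x' = (i : Int) from ⟨x, List.mem_cons_self, hhit⟩)]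
        have hi : i < im.length := by omega
        have hgeti : PySem.List.pyGetD im x ([] : List (List Int)) = im[i] := by
          rw [PySem.List.pyGetD_eq_getElem _ _ hx.1 hx.2]
          exact Option.some.inj (by
            rw [← List.getElem?_eq_getElem (by omega : x.toNat < im.length),
                show x.toNat = i from by omega, List.getElem?_eq_getElem hi])
        rw [hgeti, show x.toNat = i from by omega, List.getElem?_set_self hi,
            List.getElem?_eq_getElem hi, Option.map_some]
      · rw [List.getElem?_set_ne (show x.toNat ≠ i from by omega),
            if_neg (show ¬ ∃ x' ∈ x :: xs, x' = (i : Int) from by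
              rintro ⟨x', hx', h2⟩
              rcases List.mem_cons.mp hx' with rfl | hm
              · exact hhit h2
              · exact hxs ⟨x', hm, h2⟩)]

-- cells of the slice write
theorem spliceRow_getElem? (row : List (List Int)) (a b : Nat) (hab : a ≤ b)
    (hb : b ≤ row.length) (j : Nat) :
    (spliceRow row a b)[j]? = if a ≤ j ∧ j < b then some [255, 255, 0] else row[j]? := by
  unfold spliceRow
  have hta : (row.take a).length = a := by rw [List.length_take]; omega
  by_cases h1 : j < a
  · rw [List.getElem?_append_left (by omega), if_neg (show ¬(a ≤ j ∧ j < b) from by omega),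
        List.getElem?_take, if_pos h1]
  · rw [List.getElem?_append_right (by omega), hta]
    by_cases h2 : j < b
    · rw [List.getElem?_append_left (by rw [List.length_map, List.length_range]; omega),
          if_pos (show a ≤ j ∧ j < b from by omega),
          List.getElem?_map, List.getElem?_range (by omega : j - a < b - a), Option.map_some]
    · rw [List.getElem?_append_right (by rw [List.length_map, List.length_range]; omega),
          if_neg (show ¬(a ≤ j ∧ j < b) from by omega),
          List.length_map, List.length_range, List.getElem?_drop]
      congr 1
      omega

theorem foldl_offset (l : List Int) (c : Int)
    (f : List (List (List Int)) → Int → List (List (List Int))) (init : List (List (List Int))) :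
    l.foldl (fun acc x => f acc (x + c)) init = (l.map (· + c)).foldl f init := by
  rw [List.foldl_map]

theorem pyGetD_zero_eq_getD (l : List Int) : PySem.List.pyGetD l 0 0 = l.getD 0 0 := by
  have := PySem.List.pyGetD_natCast (xs := l) (n := 0) (d := 0)
  simpa using this

theorem pyGetD_one_eq_getD (l : List Int) : PySem.List.pyGetD l 1 0 = l.getD 1 0 := by
  have := PySem.List.pyGetD_natCast (xs := l) (n := 1) (d := 0)
  simpa using this

-- ===== VERDICT (by name: the statement is the Claim_ definition above) =====
theorem create_box_spec : Claim_equal_create_box := by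
  intro img centre xy _hdom hpre
  unfold Spec_create_box
  by_cases hxy : xy ≤ 0
  · unfold create_box create_box_alt
    rw [PySem.List.pyRange_one_eq_nil (by omega : xy ≤ -xy), if_pos hxy]
    rfl
  · push_neg at hxy
    obtain ⟨hclen, hrows⟩ := hpre.resolve_left (by omega)
    set c0 : Int := PySem.List.pyGetD centre 0 0 with hc0
    set c1 : Int := PySem.List.pyGetD centre 1 0 with hc1
    have hc0' : c0 = centre.getD 0 0 := pyGetD_zero_eq_getD centre
    have hc1' : c1 = centre.getD 1 0 := pyGetD_one_eq_getD centre
    set N : Int := (img.length : Int) with hN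
    set M : Int := ((img.headD []).length : Int) with hM
    set x0 : Int := max 0 (c0 - xy) with hx0
    set x1 : Int := min N (c0 + xy) with hx1
    set y0 : Int := max 0 (c1 - xy) with hy0
    set y1 : Int := min M (c1 + xy) with hy1
    set ysm : List Int := (PySem.List.pyRange (-xy) xy 1).map (· + c1) with hysm
    simp only [← hc0', ← hc1', ← hy0, ← hy1] at hrows
    -- A, cell-characterised
    have hA : ∀ i : Nat, (create_box img centre xy)[i]? =
        if ∃ x ∈ (PySem.List.pyRange (-xy) xy 1).map (· + c0), x = (i : Int) ∧ x < ((img.length : Nat) : Int)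
        then (img[i]?).map (paint ((img.headD []).length) ysm) else img[i]? := by
      intro i
      have hbody : ∀ (im : List (List (List Int))) (x_ : Int),
          (PySem.List.pyRange (-xy) xy 1).foldl (fun im' y_ => stepA im' (x_ + c0) (y_ + c1)) im
          = Abody ysm im (x_ + c0) := by
        intro im x_
        rw [hysm]
        exact (foldl_offset _ c1 (fun im' y => stepA im' (x_ + c0) y) im).trans
          (inner_fold (x_ + c0) _ im)
      have hA0 : create_box img centre xy =
          ((PySem.List.pyRange (-xy) xy 1).map (· + c0)).foldl (Abody ysm) img := by
        unfold create_box
        rw [← hc0, ← hc1]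
        have hfun : (fun (im : List (List (List Int))) (x_ : Int) =>
            (PySem.List.pyRange (-xy) xy 1).foldl (fun im' y_ => stepA im' (x_ + c0) (y_ + c1)) im)
            = fun im x_ => Abody ysm im (x_ + c0) :=
          funext fun im => funext fun x_ => hbody im x_
        rw [hfun]
        exact foldl_offset _ c0 (Abody ysm) img
      rw [hA0, outerA_getElem? ysm _
        ((PySem.List.nodup_pyRange_one (-xy) xy).map (fun a b h => by omega)) img i]
    by_cases hxw : x0 < x1
    · by_cases hyw : y0 < y1
      · -- both windows nonempty: B runs its row loop
        have hB : create_box_alt img centre xy =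
            (PySem.List.pyRange x0 x1 1).foldl
              (fun im x => PySem.List.pySetD im x
                ((fun r => spliceRow r y0.toNat y1.toNat) (PySem.List.pyGetD im x [])))
              img := by
          simp only [create_box_alt]
          rw [if_neg (show ¬ xy ≤ 0 from by omega)]
          simp only [← hc0, ← hc1, ← hN, ← hM, ← hx0, ← hx1, ← hy0, ← hy1]
          rw [if_pos hxw, if_pos hyw]
        rw [hB]
        apply List.ext_getElem?
        intro i
        rw [hA i, outerB_getElem? (fun r => spliceRow r y0.toNat y1.toNat) _ (PySem.List.nodup_pyRange_one x0 x1) _ (by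
          intro x hxm
          rw [PySem.List.mem_pyRange_one] at hxm
          constructor <;> omega) i]
        by_cases hcc : ∃ x ∈ PySem.List.pyRange x0 x1 1, x = (i : Int)
        · rw [if_pos hcc, if_pos (show ∃ x ∈ (PySem.List.pyRange (-xy) xy 1).map (· + c0),
              x = (i : Int) ∧ x < ((img.length : Nat) : Int) from by
            obtain ⟨x, hxm, rfl⟩ := hcc
            rw [PySem.List.mem_pyRange_one] at hxm
            exact ⟨(i : Int), List.mem_map.mpr ⟨(i : Int) - c0,
              PySem.List.mem_pyRange_one.mpr ⟨by omega, by omega⟩, by omega⟩, rfl, by omega⟩)]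
          obtain ⟨xw, hxwm, hxw_eq⟩ := hcc
          rw [PySem.List.mem_pyRange_one] at hxwm
          have hi : i < img.length := by omega
          rw [List.getElem?_eq_getElem hi]
          simp only [Option.map_some]
          have hrowlen : y1 ≤ (img[i].length : Int) := by
            have h' := hrows i (List.mem_range.mpr hi) ⟨by omega, by omega, by omega⟩
            rwa [getD_eq_get img [] i hi] at h'
          congr 1
          apply List.ext_getElem?
          intro j
          rw [paint_getElem?, spliceRow_getElem? _ _ _ (by omega) (by omega)]
          by_cases hjc : y0 ≤ (j : Int) ∧ (j : Int) < y1
          · rw [if_pos (show y0.toNat ≤ j ∧ j < y1.toNat from by omega),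
                if_pos (show (∃ y ∈ ysm, y = (j : Int)) ∧ (j : Int) < (((img.headD []).length : Nat) : Int) ∧ j < img[i].length
                from ⟨⟨(j : Int), by
                    rw [hysm]
                    exact List.mem_map.mpr ⟨(j : Int) - c1,
                      PySem.List.mem_pyRange_one.mpr ⟨by omega, by omega⟩, by omega⟩, rfl⟩,
                  by omega, by omega⟩)]
          · rw [if_neg (show ¬(y0.toNat ≤ j ∧ j < y1.toNat) from by omega),
                if_neg (show ¬((∃ y ∈ ysm, y = (j : Int)) ∧ (j : Int) < (((img.headD []).length : Nat) : Int) ∧ j < img[i].length)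
                from by
                  rintro ⟨⟨y, hym, hye⟩, h2, h3⟩
                  rw [hysm] at hym
                  obtain ⟨y_, hy_, hye'⟩ := List.mem_map.mp hym
                  rw [PySem.List.mem_pyRange_one] at hy_
                  exact hjc ⟨by omega, by omega⟩)]
        · rw [if_neg hcc, if_neg (show ¬ ∃ x ∈ (PySem.List.pyRange (-xy) xy 1).map (· + c0),
              x = (i : Int) ∧ x < ((img.length : Nat) : Int) from by
            rintro ⟨x, hxm, hxe, h3⟩
            obtain ⟨x_, hx_, hxe'⟩ := List.mem_map.mp hxm
            rw [PySem.List.mem_pyRange_one] at hx_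
            exact hcc ⟨x, PySem.List.mem_pyRange_one.mpr ⟨by omega, by omega⟩, hxe⟩)]
      · -- empty y-window: B returns img, A's paint is a no-op
        have hB : create_box_alt img centre xy = img := by
          simp only [create_box_alt]
          rw [if_neg (show ¬ xy ≤ 0 from by omega)]
          simp only [← hc0, ← hc1, ← hN, ← hM, ← hx0, ← hx1, ← hy0, ← hy1]
          rw [if_pos hxw, if_neg hyw]
        rw [hB]
        apply List.ext_getElem?
        intro i
        rw [hA i]
        by_cases hcc : ∃ x ∈ (PySem.List.pyRange (-xy) xy 1).map (· + c0),
            x = (i : Int) ∧ x < ((img.length : Nat) : Int)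
        · rw [if_pos hcc]
          obtain ⟨x, hxm, hxe, h3⟩ := hcc
          have hi : i < img.length := by omega
          rw [List.getElem?_eq_getElem hi]
          simp only [Option.map_some]
          congr 1
          apply List.ext_getElem?
          intro j
          rw [paint_getElem?, if_neg (show ¬((∃ y ∈ ysm, y = (j : Int)) ∧ (j : Int) < (((img.headD []).length : Nat) : Int) ∧ j < img[i].length)
            from by
              rintro ⟨⟨y, hym, hye⟩, h2, h3'⟩
              rw [hysm] at hym
              obtain ⟨y_, hy_, hye'⟩ := List.mem_map.mp hym
              rw [PySem.List.mem_pyRange_one] at hy_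
              omega)]
        · rw [if_neg hcc]
    · -- empty x-window: B returns img, A touches no row
      have hB : create_box_alt img centre xy = img := by
        simp only [create_box_alt]
        rw [if_neg (show ¬ xy ≤ 0 from by omega)]
        simp only [← hc0, ← hN, ← hx0, ← hx1]
        rw [if_neg hxw]
      rw [hB]
      apply List.ext_getElem?
      intro i
      rw [hA i, if_neg (show ¬ ∃ x ∈ (PySem.List.pyRange (-xy) xy 1).map (· + c0),
          x = (i : Int) ∧ x < ((img.length : Nat) : Int) from by
        rintro ⟨x, hxm, hxe, h3⟩
        obtain ⟨x_, hx_, hxe'⟩ := List.mem_map.mp hxm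
        rw [PySem.List.mem_pyRange_one] at hx_
        omega)]
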